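-- pv_equiv track=rewrite | github.com/gmichalo/question_identification_on_medical_logs | preprocessing/question_indetification.py | W5H1_aux
-- ===== SOURCE A (Python) =====
-- W5H1 = ["who ", "what ", "where ", "when ", "why ", "how "]
--
-- aux_vers = ["am", "is", "are", "was", "were", "do", "does", "did", "have", "had", "has", "will"]
--
-- def W5H1_aux(sentence):
--     W5H1_flag_aux = False
--     for word in W5H1:
--         for aux in aux_vers:
--             word_temp = word + aux
--             if sentence.lower().find(word_temp) != -1:
--                 W5H1_flag_aux = True
--                 break
--     return W5H1_flag_aux
-- ===== SOURCE B (Python) =====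
-- WORDS = "who what where when why how".split(" ")
-- AUX = "am is are was were do does did have had has will".split(" ")
--
-- def W5H1_aux(sentence):
--     # Pivot on each space of the lowercased sentence: a match is a bare 5W1H
--     # word ending just before a space and an aux verb starting just after it.
--     s = sentence.lower()
--     for i, c in enumerate(s):
--         if c == " " and any(s.endswith(w, 0, i) for w in WORDS) \
--                 and any(s.startswith(a, i + 1) for a in AUX):
--             return True
--     return False
-- ===== Notes on version B (the rewrite author's own statement) =====
-- stated objective: faster
-- what changed: Instead of A's 72 separate full-string find() scans, each rebuilding sentence.lower(), B lowercases once and makes a single pass pivoting on each space character, checking whether a bare 5W1H word ends just before it and an aux verb starts just after it.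
import Mathlib
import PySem

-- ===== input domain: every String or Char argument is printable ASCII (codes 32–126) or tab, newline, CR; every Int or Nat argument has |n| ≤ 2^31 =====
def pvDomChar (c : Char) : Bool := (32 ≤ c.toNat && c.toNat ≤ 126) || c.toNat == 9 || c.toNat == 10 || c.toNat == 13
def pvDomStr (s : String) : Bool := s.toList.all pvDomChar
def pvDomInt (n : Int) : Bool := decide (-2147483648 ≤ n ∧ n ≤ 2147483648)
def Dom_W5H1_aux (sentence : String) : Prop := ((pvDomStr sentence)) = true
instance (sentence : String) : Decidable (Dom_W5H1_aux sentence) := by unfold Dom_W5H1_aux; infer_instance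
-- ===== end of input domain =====

-- B lowercases once and makes a single pass pivoting on each space character (word before,
-- aux verb after), instead of A's 72 separate substring searches (objective: alternative).

-- ===== PORT A =====
-- module constants W5H1 and aux_vers (as lists of chars; Python str ops are on the list side)
def pvW5H1 : List (List Char) :=
  ["who ".toList, "what ".toList, "where ".toList, "when ".toList, "why ".toList, "how ".toList]
def pvAuxVers : List (List Char) :=
  ["am".toList, "is".toList, "are".toList, "was".toList, "were".toList, "do".toList,
   "does".toList, "did".toList, "have".toList, "had".toList, "has".toList, "will".toList]

-- inner 'for aux in aux_vers: … break': stops (returning True) at the first matching aux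
def W5H1innerA (sentence : String) (word : List Char) : List (List Char) → Bool → Bool
  | [], flag => flag
  | aux :: rest, flag =>
    let word_temp := word ++ aux
    if PySem.Chars.find (PySem.Chars.lower sentence.toList) word_temp ≠ -1 then true
    else W5H1innerA sentence word rest flag

def W5H1_aux (sentence : String) : Bool :=
  pvW5H1.foldl (fun flag word => W5H1innerA sentence word pvAuxVers flag) false

-- ===== PORT B =====
-- B's constants, built by splitting one string, as in Source B
def pvWordsB : List (List Char) := "who what where when why how".toList.splitOn ' '
def pvAuxB : List (List Char) :=
  "am is are was were do does did have had has will".toList.splitOn ' '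

-- 'for i, c in enumerate(s)': recursion over the suffix; 'rev' is the reverse of s[:i], so
-- s.endswith(w, 0, i) is exactly 'w.reverse is a prefix of rev' and s.startswith(a, i+1)
-- is 'a is a prefix of the remaining suffix' — both exact.
def pvPivotScan (rev : List Char) : List Char → Bool
  | [] => false
  | c :: rest =>
    ((c == ' ') && pvWordsB.any (fun w => w.reverse.isPrefixOf rev)
       && pvAuxB.any (fun a => a.isPrefixOf rest))
    || pvPivotScan (c :: rev) rest

def W5H1_aux_alt (sentence : String) : Bool :=
  pvPivotScan [] (PySem.Chars.lower sentence.toList)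

-- ===== PRECONDITION & SPEC =====
def Spec_W5H1_aux (sentence : String) (out : Bool) : Prop := out = W5H1_aux_alt sentence
instance (sentence : String) (out : Bool) : Decidable (Spec_W5H1_aux sentence out) := by unfold Spec_W5H1_aux; infer_instance

-- ===== CLAIM (what is proved, stated in full; the proofs are below) =====
def Claim_equal_W5H1_aux : Prop := ∀ (sentence : String), Dom_W5H1_aux sentence → Spec_W5H1_aux sentence (W5H1_aux sentence)

-- ===== LEMMAS AND PROOFS =====

-- A's inner loop returns true iff the flag was set or some aux makes word++aux a substring
theorem W5H1innerA_eq (sentence : String) (word : List Char) (auxs : List (List Char)) (flag : Bool) :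
    W5H1innerA sentence word auxs flag =
      (flag || auxs.any (fun a => PySem.Chars.isIn (word ++ a) (PySem.Chars.lower sentence.toList))) := by
  induction auxs generalizing flag with
  | nil => simp [W5H1innerA]
  | cons a rest ih =>
    simp only [W5H1innerA, List.any_cons]
    by_cases h : PySem.Chars.find (PySem.Chars.lower sentence.toList) (word ++ a) ≠ -1
    · have : PySem.Chars.isIn (word ++ a) (PySem.Chars.lower sentence.toList) = true := by
        rw [PySem.Chars.isIn_iff_infix]
        exact (PySem.Chars.find_ne_neg_one_iff _ _).mp h
      simp [h, this]
    · rw [not_ne_iff] at h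
      have : PySem.Chars.isIn (word ++ a) (PySem.Chars.lower sentence.toList) = false := by
        rw [PySem.Chars.isIn_eq_false_iff]
        exact (PySem.Chars.find_eq_neg_one_iff _ _).mp h
      simp [h, this, ih]

-- A as an 'any' over all 72 phrases
theorem W5H1_aux_eq_any (sentence : String) :
    W5H1_aux sentence =
      pvW5H1.any (fun w => pvAuxVers.any (fun a =>
        PySem.Chars.isIn (w ++ a) (PySem.Chars.lower sentence.toList))) := by
  unfold W5H1_aux
  have h : ∀ (ws : List (List Char)) (flag : Bool),
      ws.foldl (fun flag word => W5H1innerA sentence word pvAuxVers flag) flag =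
        (flag || ws.any (fun w => pvAuxVers.any (fun a =>
          PySem.Chars.isIn (w ++ a) (PySem.Chars.lower sentence.toList)))) := by
    intro ws
    induction ws with
    | nil => simp
    | cons w rest ih =>
      intro flag
      rw [List.foldl_cons, W5H1innerA_eq, ih, Bool.or_assoc]
      simp
  simpa using h pvW5H1 false

-- a phrase 'word ++ space ++ aux' occurs as a substring iff some space splits the string
-- into a part ending in 'word' and a part starting with 'aux'
theorem pv_phrase_infix (w a s : List Char) :
    (w ++ ' ' :: a) <:+: s ↔ ∃ p q, s = p ++ ' ' :: q ∧ w <:+ p ∧ a <+: q := by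
  constructor
  · rintro ⟨u, v, rfl⟩
    exact ⟨u ++ w, a ++ v, by simp, ⟨u, rfl⟩, ⟨v, rfl⟩⟩
  · rintro ⟨p, q, rfl, ⟨u, rfl⟩, ⟨v, rfl⟩⟩
    exact ⟨u, v, by simp⟩

-- the pivot scan with accumulated reversed prefix 'rev' finds exactly the splits
theorem pvPivotScan_iff (t rev : List Char) :
    pvPivotScan rev t = true ↔
      ∃ p q, t = p ++ ' ' :: q ∧
        (∃ w ∈ pvWordsB, w.reverse <+: (p.reverse ++ rev)) ∧
        (∃ a ∈ pvAuxB, a <+: q) := by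
  induction t generalizing rev with
  | nil =>
    simp only [pvPivotScan, Bool.false_eq_true, false_iff]
    rintro ⟨p, q, h, -, -⟩
    exact List.cons_ne_nil _ _ (List.append_eq_nil_iff.mp h.symm).2
  | cons c rest ih =>
    simp only [pvPivotScan, Bool.or_eq_true, Bool.and_eq_true, beq_iff_eq,
      List.any_eq_true, List.isPrefixOf_iff_prefix, ih]
    constructor
    · rintro (⟨⟨hc, hw⟩, ha⟩ | ⟨p, q, rfl, hw, ha⟩)
      · exact ⟨[], rest, by rw [hc]; rfl, by simpa using hw, ha⟩
      · exact ⟨c :: p, q, rfl, by simpa using hw, ha⟩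
    · rintro ⟨p, q, hpq, hw, ha⟩
      cases p with
      | nil =>
        obtain ⟨rfl, rfl⟩ : c = ' ' ∧ rest = q := by
          simpa using hpq
        exact Or.inl ⟨⟨rfl, by simpa using hw⟩, ha⟩
      | cons c' p' =>
        obtain ⟨rfl, rfl⟩ : c = c' ∧ rest = p' ++ ' ' :: q := by
          simpa using hpq
        exact Or.inr ⟨p', q, rfl, by simpa using hw, ha⟩

-- A's space-terminated words are B's bare words with a space appended, and the aux lists agree
theorem pv_words_eq : pvW5H1 = pvWordsB.map (fun w => w ++ [' ']) := by decide
theorem pv_aux_eq : pvAuxVers = pvAuxB := by decide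

-- ===== VERDICT (by name: the statement is the Claim_ definition above) =====
theorem W5H1_aux_spec : Claim_equal_W5H1_aux := by
  intro sentence _
  unfold Spec_W5H1_aux W5H1_aux_alt
  apply Bool.coe_iff_coe.mp
  rw [W5H1_aux_eq_any, pvPivotScan_iff, pv_words_eq, pv_aux_eq]
  simp only [List.any_map, List.any_eq_true, PySem.Chars.isIn_iff_infix, Function.comp]
  constructor
  · rintro ⟨w, hw, a, ha, hinf⟩
    have : (w ++ ' ' :: a) <:+: PySem.Chars.lower sentence.toList := by
      simpa using hinf
    obtain ⟨p, q, heq, hsuf, hpre⟩ := (pv_phrase_infix w a _).mp this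
    exact ⟨p, q, heq, ⟨w, hw, by simpa [List.reverse_prefix] using hsuf⟩, ⟨a, ha, hpre⟩⟩
  · rintro ⟨p, q, hpq, ⟨w, hw, hsuf⟩, ⟨a, ha, hpre⟩⟩
    refine ⟨w, hw, a, ha, ?_⟩
    have hsuf' : w <:+ p := by
      have := hsuf
      rw [List.append_nil] at this
      exact List.reverse_prefix.mp this
    have : (w ++ ' ' :: a) <:+: PySem.Chars.lower sentence.toList :=
      (pv_phrase_infix w a _).mpr ⟨p, q, hpq, hsuf', hpre⟩
    simpa using this
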